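-- pv_equiv track=rewrite | github.com/haolpku/K12-Dataset | src/benchmark/generate_benchmark.py | collect_successor_closure
-- ===== SOURCE A (Python) =====
-- from typing import Any, DefaultDict, Dict, Iterable, List, Optional, Sequence, Set, Tuple
--
-- def collect_successor_closure(prereq_out: Dict[str, Set[str]], start_id: str) -> Set[str]:
--     visited: Set[str] = set()
--     stack = list(prereq_out.get(start_id, set()))
--     while stack:
--         node_id = stack.pop()
--         if node_id in visited:
--             continue
--         visited.add(node_id)
--         stack.extend(prereq_out.get(node_id, set()))
--     return visited
-- ===== SOURCE B (Python) =====
-- from typing import Dict, Set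
--
--
-- def collect_successor_closure(prereq_out: Dict[str, Set[str]], start_id: str) -> Set[str]:
--     visited: Set[str] = set()
--
--     def dfs(node_id: str) -> None:
--         visited.add(node_id)
--         for succ in prereq_out.get(node_id, set()):
--             if succ not in visited:
--                 dfs(succ)
--
--     for succ in prereq_out.get(start_id, set()):
--         if succ not in visited:
--             dfs(succ)
--     return visited
-- ===== Notes on version B (the rewrite author's own statement) =====
-- stated objective: alternative
-- what changed: A's iterative worklist (explicit stack, duplicates allowed, visited checked at pop time) is replaced by a recursive DFS helper that checks membership before descending, so no node is ever stacked twice and no stack is materialised.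
import Mathlib
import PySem

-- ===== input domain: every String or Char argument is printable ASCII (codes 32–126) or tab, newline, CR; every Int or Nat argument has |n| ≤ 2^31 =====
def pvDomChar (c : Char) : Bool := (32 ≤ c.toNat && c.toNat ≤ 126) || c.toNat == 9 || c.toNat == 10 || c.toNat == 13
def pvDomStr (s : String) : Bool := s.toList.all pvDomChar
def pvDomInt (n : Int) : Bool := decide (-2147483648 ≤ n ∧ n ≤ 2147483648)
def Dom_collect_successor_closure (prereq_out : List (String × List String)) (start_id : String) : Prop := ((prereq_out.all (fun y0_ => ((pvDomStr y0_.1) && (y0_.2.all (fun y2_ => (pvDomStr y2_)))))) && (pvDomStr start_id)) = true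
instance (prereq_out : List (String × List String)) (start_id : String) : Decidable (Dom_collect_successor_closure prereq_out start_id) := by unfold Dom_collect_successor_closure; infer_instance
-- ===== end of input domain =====

-- B replaces A's explicit worklist stack (visited checked at pop time, duplicates allowed on
-- the stack) by a recursive DFS helper that checks membership before descending: an
-- alternative decomposition of the same closure computation, same complexity.
-- The Python values are sets (no modelled iteration order); the set result is order-independent,
-- and both ports consume the given element lists: A's port pops from the list's end, B's port
-- iterates the list reversed, which is the same processing order.

-- ===== PORT A =====
-- prereq_out.get(k, set())
def pvGetD (g : List (String × List String)) (k : String) : List String :=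
  PySem.Dict.getD ⟨g⟩ k []

-- all strings occurring in successor lists (used only to size the fuel, a totality artifact)
def pvAllSucc (g : List (String × List String)) : List String := g.flatMap (fun e => e.2)

-- the 'while stack:' loop; fuel is a totality artifact, chosen provably large enough
def pvALoop (g : List (String × List String)) : Nat → PySem.Set String → List String → PySem.Set String
  | 0, visited, _ => visited
  | fuel+1, visited, stack =>
    match PySem.List.pop? stack with            -- node_id = stack.pop()
    | none => visited                           -- while stack: exits
    | some (node, rest) =>
      if PySem.Set.contains visited node then pvALoop g fuel visited rest   -- continue
      else pvALoop g fuel (PySem.Set.add visited node) (rest ++ pvGetD g node)  -- add, extend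

def collect_successor_closure (prereq_out : List (String × List String)) (start_id : String) : List String :=
  pvALoop prereq_out
    ((pvAllSucc prereq_out).length * ((pvAllSucc prereq_out).length + 1) + (pvGetD prereq_out start_id).length + 1)
    PySem.Set.empty (pvGetD prereq_out start_id)

-- ===== PORT B =====
-- dfs(node): visited.add(node); for succ in …: if succ not in visited: dfs(succ)
-- pvDfsGo is the 'for succ in …' loop (over the value list reversed, see header note);
-- fuel bounds the recursion depth, a totality artifact.
mutual
def pvDfs (g : List (String × List String)) : Nat → PySem.Set String → String → PySem.Set String
  | 0, visited, _ => visited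
  | fuel+1, visited, node =>
      pvDfsGo g fuel (PySem.Set.add visited node) ((pvGetD g node).reverse)
termination_by fuel _ _ => (fuel, 0)

def pvDfsGo (g : List (String × List String)) : Nat → PySem.Set String → List String → PySem.Set String
  | _, visited, [] => visited
  | fuel, visited, succ :: rest =>
      if PySem.Set.contains visited succ then pvDfsGo g fuel visited rest
      else pvDfsGo g fuel (pvDfs g fuel visited succ) rest
termination_by fuel _ l => (fuel, l.length + 1)
end

def collect_successor_closure_alt (prereq_out : List (String × List String)) (start_id : String) : List String :=
  pvDfsGo prereq_out ((pvAllSucc prereq_out).length + 1) PySem.Set.empty ((pvGetD prereq_out start_id).reverse)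

-- ===== PRECONDITION & SPEC =====
def Spec_collect_successor_closure (prereq_out : List (String × List String)) (start_id : String) (out : List String) : Prop := out = collect_successor_closure_alt prereq_out start_id
instance (prereq_out : List (String × List String)) (start_id : String) (out : List String) : Decidable (Spec_collect_successor_closure prereq_out start_id out) := by unfold Spec_collect_successor_closure; infer_instance

-- ===== CLAIM (what is proved, stated in full; the proofs are below) =====
def Claim_equal_collect_successor_closure : Prop := ∀ (prereq_out : List (String × List String)) (start_id : String), Dom_collect_successor_closure prereq_out start_id → Spec_collect_successor_closure prereq_out start_id (collect_successor_closure prereq_out start_id)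

-- ===== LEMMAS AND PROOFS =====

-- number of distinct successor-list strings not yet visited
def pvN (g : List (String × List String)) (v : List String) : Nat :=
  ((PySem.List.dedup (pvAllSucc g)).filter (fun x => !(v.contains x))).length

theorem pvGetD_subset (g : List (String × List String)) (k : String) :
    ∀ x ∈ pvGetD g k, x ∈ pvAllSucc g := by
  intro x hx
  unfold pvGetD PySem.Dict.getD PySem.Dict.get? at hx
  cases hf : List.find? (fun p => p.1 == k) g with
  | none => rw [hf] at hx; simp at hx
  | some p =>
    rw [hf] at hx; simp at hx
    exact List.mem_flatMap.mpr ⟨p, List.mem_of_find?_eq_some hf, hx⟩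

theorem pvGetD_len (g : List (String × List String)) (k : String) :
    (pvGetD g k).length ≤ (pvAllSucc g).length := by
  unfold pvGetD PySem.Dict.getD PySem.Dict.get? pvAllSucc
  cases hf : List.find? (fun p => p.1 == k) g with
  | none => simp
  | some p =>
    simp only [Option.map_some, Option.getD_some, List.length_flatMap]
    exact List.single_le_sum (by simp) _ (List.mem_map.mpr ⟨p, List.mem_of_find?_eq_some hf, rfl⟩)

theorem pvN_le (g : List (String × List String)) (v : List String) :
    pvN g v ≤ (pvAllSucc g).length := by
  unfold pvN
  calc ((PySem.List.dedup (pvAllSucc g)).filter _).length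
      ≤ (PySem.List.dedup (pvAllSucc g)).length := List.length_filter_le _ _
    _ ≤ (pvAllSucc g).length := by
        rw [PySem.List.dedup_eq_ofList]; exact PySem.Set.length_ofList_le _

theorem pvFilterStep {x : String} {v : List String} (hv : x ∉ v) :
    ∀ (U : List String), U.Nodup → x ∈ U →
      (U.filter (fun y => !((v ++ [x]).contains y))).length + 1
        = (U.filter (fun y => !(v.contains y))).length := by
  intro U
  induction U with
  | nil => intro _ h; simp at h
  | cons y rest ih =>
    intro hnd hmem
    have hyr : y ∉ rest := (List.nodup_cons.mp hnd).1
    have hndr : rest.Nodup := (List.nodup_cons.mp hnd).2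
    by_cases hyx : y = x
    · have hxr : x ∉ rest := hyx ▸ hyr
      have hfe : rest.filter (fun z => !((v ++ [x]).contains z))
          = rest.filter (fun z => !(v.contains z)) := by
        apply List.filter_congr
        intro z hz
        have hzx : z ≠ x := fun h => hxr (h ▸ hz)
        simp [hzx]
      simp only [List.filter_cons]
      have h1 : (!((v ++ [x]).contains y)) = false := by simp [hyx]
      have h2 : (!(v.contains y)) = true := by simp [hyx, hv]
      rw [h1, h2, hfe]
      simp
    · have hxr : x ∈ rest := by
        cases List.mem_cons.mp hmem with
        | inl h => exact absurd h.symm hyx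
        | inr h => exact h
      simp only [List.filter_cons]
      have he : (!((v ++ [x]).contains y)) = (!(v.contains y)) := by
        simp
        intro _
        exact hyx
      rw [he]
      by_cases hb : (!(v.contains y)) = true
      · simp only [if_pos hb, List.length_cons]
        have := ih hndr hxr
        omega
      · simp only [if_neg hb]
        exact ih hndr hxr

theorem pvN_add (g : List (String × List String)) {v : List String} {x : String}
    (hU : x ∈ pvAllSucc g) (hv : x ∉ v) : pvN g (v ++ [x]) + 1 = pvN g v := by
  unfold pvN
  exact pvFilterStep hv _ (by rw [PySem.List.dedup_eq_ofList]; exact PySem.Set.nodup_ofList _)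
    ((PySem.List.mem_dedup _ _).mpr hU)

theorem pvN_mono (g : List (String × List String)) {v v' : List String}
    (h : ∀ y, y ∈ v → y ∈ v') : pvN g v' ≤ pvN g v := by
  unfold pvN
  refine (List.monotone_filter_right _ ?_).length_le
  intro a ha
  simp only [Bool.not_eq_true', ← Bool.not_eq_true] at *
  intro hc
  exact ha (by simpa using h a (by simpa using hc))

theorem pvAdd_prefix (v : PySem.Set String) (n : String) : v <+: PySem.Set.add v n := by
  unfold PySem.Set.add
  split
  · exact List.prefix_refl _
  · exact List.prefix_append _ _

-- visited only grows (as a prefix) through the DFS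
theorem pvGo_prefix_of (g : List (String × List String)) (f : Nat)
    (hf : ∀ v n, v <+: pvDfs g f v n) : ∀ l v, v <+: pvDfsGo g f v l := by
  intro l
  induction l with
  | nil => intro v; simp [pvDfsGo]
  | cons succ rest ih =>
    intro v
    simp only [pvDfsGo]
    split
    · exact ih v
    · exact (hf v succ).trans (ih _)

theorem pvDfs_prefix (g : List (String × List String)) :
    ∀ f v n, v <+: pvDfs g f v n := by
  intro f
  induction f with
  | zero => intro v n; simp [pvDfs]
  | succ f ih =>
    intro v n
    simp only [pvDfs]
    exact (pvAdd_prefix v n).trans (pvGo_prefix_of g f ih _ _)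

theorem pvGo_prefix (g : List (String × List String)) (f : Nat) :
    ∀ l v, v <+: pvDfsGo g f v l :=
  pvGo_prefix_of g f (pvDfs_prefix g f)

-- the DFS result does not depend on the fuel once the fuel is sufficient
theorem pvDfsGo_fuel (g : List (String × List String)) :
    ∀ k v l f1 f2, (∀ x ∈ l, x ∈ pvAllSucc g) → pvN g v ≤ k →
      pvN g v + 1 ≤ f1 → pvN g v + 1 ≤ f2 →
      pvDfsGo g f1 v l = pvDfsGo g f2 v l := by
  intro k
  induction k with
  | zero =>
    intro v l f1 f2
    induction l generalizing v f1 f2 with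
    | nil => intro _ _ _ _; simp [pvDfsGo]
    | cons succ rest ihl =>
      intro hl hk h1 h2
      simp only [pvDfsGo]
      by_cases hm : succ ∈ v
      · have hc : PySem.Set.contains v succ = true := (PySem.Set.contains_iff _ _).mpr hm
        rw [if_pos hc, if_pos hc]
        exact ihl v f1 f2 (fun x hx => hl x (List.mem_cons_of_mem _ hx)) hk h1 h2
      · exfalso
        have := pvN_add g (hl succ (List.mem_cons_self)) hm
        omega
  | succ k ihk =>
    intro v l f1 f2
    induction l generalizing v f1 f2 with
    | nil => intro _ _ _ _; simp [pvDfsGo]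
    | cons succ rest ihl =>
      intro hl hk h1 h2
      simp only [pvDfsGo]
      by_cases hm : succ ∈ v
      · have hc : PySem.Set.contains v succ = true := (PySem.Set.contains_iff _ _).mpr hm
        rw [if_pos hc, if_pos hc]
        exact ihl v f1 f2 (fun x hx => hl x (List.mem_cons_of_mem _ hx)) hk h1 h2
      · have hc : ¬ (PySem.Set.contains v succ = true) :=
          fun h => hm ((PySem.Set.contains_iff _ _).mp h)
        have hU := hl succ (List.mem_cons_self)
        have hstep := pvN_add g hU hm
        match f1, f2, h1, h2 with
        | f1' + 1, f2' + 1, h1, h2 =>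
        rw [if_neg hc, if_neg hc]
        simp only [pvDfs]
        rw [PySem.Set.add_of_not_mem hm]
        have hsub : ∀ x ∈ (pvGetD g succ).reverse, x ∈ pvAllSucc g :=
          fun x hx => pvGetD_subset g succ x (List.mem_reverse.mp hx)
        have e1 : pvDfsGo g f1' (v ++ [succ]) ((pvGetD g succ).reverse)
            = pvDfsGo g f2' (v ++ [succ]) ((pvGetD g succ).reverse) :=
          ihk _ _ f1' f2' hsub (by omega) (by omega) (by omega)
        rw [e1]
        have hpre : (v ++ [succ]) <+: pvDfsGo g f2' (v ++ [succ]) ((pvGetD g succ).reverse) :=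
          pvGo_prefix g f2' _ _
        have hmono : pvN g (pvDfsGo g f2' (v ++ [succ]) ((pvGetD g succ).reverse))
            ≤ pvN g (v ++ [succ]) :=
          pvN_mono g (fun y hy => hpre.subset hy)
        exact ihl _ (f1' + 1) (f2' + 1) (fun x hx => hl x (List.mem_cons_of_mem _ hx))
          (by omega) (by omega) (by omega)

theorem pvDfsGo_append (g : List (String × List String)) (f : Nat) :
    ∀ l1 l2 v, pvDfsGo g f v (l1 ++ l2) = pvDfsGo g f (pvDfsGo g f v l1) l2 := by
  intro l1
  induction l1 with
  | nil => intro l2 v; simp [pvDfsGo]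
  | cons succ rest ih =>
    intro l2 v
    simp only [List.cons_append, pvDfsGo]
    split
    · exact ih l2 v
    · exact ih l2 _

-- the bridge: A's stack loop equals B's DFS over the reversed stack
theorem pvBridge (g : List (String × List String)) :
    ∀ fa v stack fb, (∀ x ∈ stack, x ∈ pvAllSucc g) →
      pvN g v * ((pvAllSucc g).length + 1) + stack.length + 1 ≤ fa →
      pvN g v + 1 ≤ fb →
      pvALoop g fa v stack = pvDfsGo g fb v stack.reverse := by
  intro fa
  induction fa with
  | zero => intro v stack fb _ hfa _; omega
  | succ fa ih =>
    intro v stack fb hl hfa hfb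
    rcases stack.eq_nil_or_concat with rfl | ⟨rest, n, rfl⟩
    · simp [pvALoop, pvDfsGo, PySem.List.pop?]
    · simp only [List.concat_eq_append] at hl hfa ⊢
      simp only [pvALoop]
      rw [PySem.List.pop?_last]
      dsimp only
      have hrev : (rest ++ [n]).reverse = n :: rest.reverse := by simp
      rw [hrev]
      have hUn : n ∈ pvAllSucc g := hl n (by simp)
      have hlen : (rest ++ [n]).length = rest.length + 1 := by simp
      by_cases hm : n ∈ v
      · have hc : PySem.Set.contains v n = true := (PySem.Set.contains_iff _ _).mpr hm
        rw [if_pos hc]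
        conv_rhs => rw [pvDfsGo]
        rw [if_pos hc]
        exact ih v rest fb (fun x hx => hl x (by simp [hx])) (by omega) hfb
      · have hc : ¬ (PySem.Set.contains v n = true) :=
          fun h => hm ((PySem.Set.contains_iff _ _).mp h)
        rw [if_neg hc, PySem.Set.add_of_not_mem hm]
        have hstep := pvN_add g hUn hm
        have hglen := pvGetD_len g n
        have hsub2 : ∀ x ∈ rest ++ pvGetD g n, x ∈ pvAllSucc g := by
          intro x hx
          rcases List.mem_append.mp hx with h | h
          · exact hl x (by simp [h])
          · exact pvGetD_subset g n x h
        have hmul : pvN g v * ((pvAllSucc g).length + 1)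
            = pvN g (v ++ [n]) * ((pvAllSucc g).length + 1) + ((pvAllSucc g).length + 1) := by
          rw [← hstep]; ring
        have hfa' : pvN g (v ++ [n]) * ((pvAllSucc g).length + 1)
            + (rest ++ pvGetD g n).length + 1 ≤ fa := by
          have : (rest ++ pvGetD g n).length = rest.length + (pvGetD g n).length := by simp
          omega
        rw [ih (v ++ [n]) (rest ++ pvGetD g n) fb hsub2 hfa' (by omega)]
        rw [List.reverse_append, pvDfsGo_append]
        conv_rhs => rw [pvDfsGo]
        rw [if_neg hc]
        match fb, hfb with
        | fb' + 1, hfb =>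
        simp only [pvDfs]
        rw [PySem.Set.add_of_not_mem hm]
        have hsubg : ∀ x ∈ (pvGetD g n).reverse, x ∈ pvAllSucc g :=
          fun x hx => pvGetD_subset g n x (List.mem_reverse.mp hx)
        rw [pvDfsGo_fuel g (pvN g (v ++ [n])) (v ++ [n]) ((pvGetD g n).reverse)
          (fb' + 1) fb' hsubg (by omega) (by omega) (by omega)]

-- ===== VERDICT (by name: the statement is the Claim_ definition above) =====
theorem collect_successor_closure_spec : Claim_equal_collect_successor_closure := by
  intro g s _
  unfold Spec_collect_successor_closure collect_successor_closure collect_successor_closure_alt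
  apply pvBridge
  · exact pvGetD_subset g s
  · have h1 := pvN_le g (PySem.Set.empty)
    have h2 := pvGetD_len g s
    nlinarith [h1, h2]
  · have := pvN_le g (PySem.Set.empty); omega
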